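-- pv_equiv track=rewrite | github.com/siddhant68/Data-Structures-Python | Coding_Questions.py | tac
-- ===== SOURCE A (Python) =====
-- def tac(treasure, color, a, b, profit, n, prevC):
--     if n == len(treasure):
--         return profit
--
--     if prevC != color[n]:
--         return max(tac(treasure, color, a, b, profit+(b*treasure[n]), n+1, color[n]),
--                    tac(treasure, color, a, b, profit, n+1, prevC))
--     else:
--         return max(tac(treasure, color, a, b, profit+(a*treasure[n]), n+1, color[n]),
--                    tac(treasure, color, a, b, profit, n+1, prevC))
-- ===== SOURCE B (Python) =====
-- def tac(treasure, color, a, b, profit, n, prevC):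
--     # Bottom-up DP over (index, previous color): O(len * distinct colors) instead of A's O(2^len).
--     L = len(treasure)
--     states = set(color[n:L]) | {prevC}
--     best = {c: 0 for c in states}   # best[c] = max extra profit from index i onward given prev color c
--     for i in reversed(range(n, L)):
--         ci, ti = color[i], treasure[i]
--         gci = best[ci]
--         best = {c: max((a if c == ci else b) * ti + gci, v) for c, v in best.items()}
--     return profit + best[prevC]
-- ===== Notes on version B (the rewrite author's own statement) =====
-- stated objective: faster
-- what changed: A's exponential take/skip recursion is replaced by a bottom-up dynamic program over (index, previous color) kept in a dict keyed by color, filled from the last index backwards.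
-- outside the precondition, e.g. on tac([5, -2], ['r', 'g'], 2, 3, 0, -1, 'g'): A returns 15, B raises KeyError
import Mathlib
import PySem

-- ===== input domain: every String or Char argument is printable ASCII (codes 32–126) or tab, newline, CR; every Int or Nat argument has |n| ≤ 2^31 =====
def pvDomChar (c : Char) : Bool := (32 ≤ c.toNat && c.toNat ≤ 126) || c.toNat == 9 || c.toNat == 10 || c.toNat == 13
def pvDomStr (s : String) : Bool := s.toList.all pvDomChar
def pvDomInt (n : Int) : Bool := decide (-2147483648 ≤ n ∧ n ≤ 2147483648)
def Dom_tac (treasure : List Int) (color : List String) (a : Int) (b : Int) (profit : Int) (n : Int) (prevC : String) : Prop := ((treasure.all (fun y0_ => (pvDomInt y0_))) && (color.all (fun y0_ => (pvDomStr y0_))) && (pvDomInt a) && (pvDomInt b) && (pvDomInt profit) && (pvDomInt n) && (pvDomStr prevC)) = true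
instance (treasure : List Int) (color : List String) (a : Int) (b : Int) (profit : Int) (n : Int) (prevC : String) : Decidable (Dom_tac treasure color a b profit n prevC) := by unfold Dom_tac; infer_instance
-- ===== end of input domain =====

-- B replaces A's exponential branching recursion by a bottom-up DP over (index, previous color)
-- kept in a dict keyed by color (objective: faster). Return-value equivalence only; neither mutates.

-- ===== PORT A =====
-- A's recursion, fuel = number of remaining indices (len(treasure) - n); at fuel 0 n = len(treasure)
-- under Pre_, so returning profit is exactly A's base case.
def tacGo (treasure : List Int) (color : List String) (a b : Int) : Nat → Int → Int → String → Int
  | 0, profit, _, _ => profit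
  | Nat.succ f, profit, n, prevC =>
    if n == (treasure.length : Int) then profit
    else
      let c := (PySem.List.pyGet? color n).getD ""
      let t := (PySem.List.pyGet? treasure n).getD 0
      if prevC != c then
        max (tacGo treasure color a b f (profit + b * t) (n + 1) c)
            (tacGo treasure color a b f profit (n + 1) prevC)
      else
        max (tacGo treasure color a b f (profit + a * t) (n + 1) c)
            (tacGo treasure color a b f profit (n + 1) prevC)

def tac (treasure : List Int) (color : List String) (a : Int) (b : Int) (profit : Int) (n : Int) (prevC : String) : Int :=
  tacGo treasure color a b ((treasure.length : Int) - n).toNat profit n prevC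

-- ===== PORT B =====
-- body of B's loop: best = {c: max((a if c == ci else b)*ti + best[ci], v) for c, v in best.items()}
def tacAltStep (treasure : List Int) (color : List String) (a b : Int)
    (best : PySem.Dict String Int) (i : Int) : PySem.Dict String Int :=
  let ci := (PySem.List.pyGet? color i).getD ""
  let ti := (PySem.List.pyGet? treasure i).getD 0
  let gci := best.getD ci 0
  PySem.Dict.ofList (best.items.map (fun p =>
    (p.1, max ((if p.1 == ci then a else b) * ti + gci) p.2)))

def tac_alt (treasure : List Int) (color : List String) (a : Int) (b : Int) (profit : Int) (n : Int) (prevC : String) : Int :=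
  let L : Int := (treasure.length : Int)
  let states : PySem.Set String :=
    PySem.Set.union (PySem.Set.ofList (PySem.List.slice color (some n) (some L))) [prevC]
  let best0 : PySem.Dict String Int :=
    states.foldl (fun d c => d.insert c 0) PySem.Dict.empty
  let best := ((PySem.List.pyRange n L 1).reverse).foldl (tacAltStep treasure color a b) best0
  profit + best.getD prevC 0

-- ===== PRECONDITION & SPEC =====
-- Pre_ keeps the natural domain 0 ≤ n ≤ len(treasure) with colors for every remaining index:
-- for n > len(treasure) or a color list shorter than the scanned range A raises IndexError, and
-- negative n (where A returns a value via Python's negative-index wraparound) is outside the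
-- task's natural domain, so it is excluded rather than mimicked.
def Pre_tac (treasure : List Int) (color : List String) (a : Int) (b : Int) (profit : Int) (n : Int) (prevC : String) : Prop :=
  0 ≤ n ∧ n ≤ (treasure.length : Int) ∧
    ((treasure.length : Int) ≤ (color.length : Int) ∨ n = (treasure.length : Int))
instance (treasure : List Int) (color : List String) (a : Int) (b : Int) (profit : Int) (n : Int) (prevC : String) : Decidable (Pre_tac treasure color a b profit n prevC) := by unfold Pre_tac; infer_instance

def pvWitness_tac : List Int × List String × Int × Int × Int × Int × String :=
  ([3, -1], ["r", "g"], 2, 3, 0, 0, "r")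

def Spec_tac (treasure : List Int) (color : List String) (a : Int) (b : Int) (profit : Int) (n : Int) (prevC : String) (out : Int) : Prop := out = tac_alt treasure color a b profit n prevC
instance (treasure : List Int) (color : List String) (a : Int) (b : Int) (profit : Int) (n : Int) (prevC : String) (out : Int) : Decidable (Spec_tac treasure color a b profit n prevC out) := by unfold Spec_tac; infer_instance

-- ===== CLAIM (what is proved, stated in full; the proofs are below) =====
def Claim_equal_tac : Prop := ∀ (treasure : List Int) (color : List String) (a : Int) (b : Int) (profit : Int) (n : Int) (prevC : String), Dom_tac treasure color a b profit n prevC → Pre_tac treasure color a b profit n prevC → Spec_tac treasure color a b profit n prevC (tac treasure color a b profit n prevC)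

-- ===== LEMMAS AND PROOFS =====

-- the common mathematical value: best extra profit over the aligned suffix, given previous color
def tacG (a b : Int) : List Int → List String → String → Int
  | [], _, _ => 0
  | _ :: _, [], _ => 0
  | t :: ts, cl :: cs, prev =>
      max ((if prev == cl then a else b) * t + tacG a b ts cs cl) (tacG a b ts cs prev)

lemma pyGetD_nat {α : Type} (xs : List α) (j : Nat) (d : α) (h : j < xs.length) :
    (PySem.List.pyGet? xs (j : Int)).getD d = xs[j] := by
  have := PySem.List.pyGetD_eq_getElem xs (i := (j : Int)) d (by omega) (by exact_mod_cast h)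
  simpa [PySem.List.pyGetD] using this

lemma tacGo_eq (treasure : List Int) (color : List String) (a b : Int)
    (hlen : treasure.length ≤ color.length) :
    ∀ (k j : Nat), j + k = treasure.length → ∀ (profit : Int) (prevC : String),
      tacGo treasure color a b k profit (j : Int) prevC
        = profit + tacG a b (treasure.drop j) (color.drop j) prevC := by
  intro k
  induction k with
  | zero =>
    intro j hj profit prevC
    have hdrop : treasure.drop j = [] := List.drop_of_length_le (by omega)
    simp [tacGo, hdrop, tacG]
  | succ f ih =>
    intro j hj profit prevC
    have hjt : j < treasure.length := by omega
    have hjc : j < color.length := by omega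
    have hne : ((j : Int) == (treasure.length : Int)) = false := by
      simp only [beq_eq_false_iff_ne, ne_eq, Int.natCast_inj]
      omega
    have hcast : (j : Int) + 1 = ((j + 1 : Nat) : Int) := by push_cast; ring
    have ih1 := ih (j + 1) (by omega)
    rw [List.drop_eq_getElem_cons hjt, List.drop_eq_getElem_cons hjc]
    simp only [tacGo, hne, Bool.false_eq_true, if_false,
      pyGetD_nat color j "" hjc, pyGetD_nat treasure j 0 hjt, hcast, ih1, tacG]
    by_cases h : prevC == color[j]
    · simp only [h, if_true]
      simp only [bne, h, Bool.not_true, Bool.false_eq_true, if_false]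
      rw [add_assoc, max_add_add_left]
    · have hb : (prevC != color[j]) = true := by simp [bne, h]
      simp only [hb, if_true, h, Bool.false_eq_true, if_false]
      rw [add_assoc, max_add_add_left]

lemma tacAlt_loop (treasure : List Int) (color : List String) (a b : Int)
    (hlen : treasure.length ≤ color.length)
    (states : List String) (hnd : states.Nodup) (n₀ : Nat)
    (hmem : ∀ j : Nat, n₀ ≤ j → (hj : j < treasure.length) →
      color[j]'(by omega) ∈ states)
    (d : PySem.Dict String Int) (hd : d.items = states.map (fun c => (c, 0))) :
    ∀ (k j : Nat), n₀ ≤ j → j + k = treasure.length →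
      (((PySem.List.pyRange (j : Int) (treasure.length : Int) 1).reverse).foldl
          (tacAltStep treasure color a b) d).items
        = states.map (fun c => (c, tacG a b (treasure.drop j) (color.drop j) c)) := by
  intro k
  induction k with
  | zero =>
    intro j hjn hj
    have hjl : (j : Int) = (treasure.length : Int) := by exact_mod_cast hj.symm ▸ (by omega : j = j + 0)
    have hnil : PySem.List.pyRange (j : Int) (treasure.length : Int) 1 = [] := by
      rw [hjl]; simp [pysem]
    have hdrop : treasure.drop j = [] := List.drop_of_length_le (by omega)
    simp [hnil, hd, hdrop, tacG]
  | succ f ih =>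
    intro j hjn hj
    have hjt : j < treasure.length := by omega
    have hjc : j < color.length := by omega
    have hcons : PySem.List.pyRange (j : Int) (treasure.length : Int) 1
        = (j : Int) :: PySem.List.pyRange ((j : Int) + 1) (treasure.length : Int) 1 :=
      PySem.List.pyRange_one_cons (by exact_mod_cast hjt)
    have hcast : (j : Int) + 1 = ((j + 1 : Nat) : Int) := by push_cast; ring
    have ihj := ih (j + 1) (by omega) (by omega)
    rw [hcons, List.reverse_cons, List.foldl_append, hcast]
    set prev := ((PySem.List.pyRange ((j + 1 : Nat) : Int) (treasure.length : Int) 1).reverse).foldl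
        (tacAltStep treasure color a b) d with hprev
    simp only [List.foldl_cons, List.foldl_nil]
    have hkeys : prev.keys = states := by
      show prev.items.map Prod.fst = states
      rw [ihj, List.map_map]
      exact (List.map_congr_left (fun c _ => rfl)).trans (List.map_id _)
    have hci : color[j] ∈ states := hmem j hjn hjt
    have hmemit : (color[j], tacG a b (treasure.drop (j + 1)) (color.drop (j + 1)) color[j]) ∈ prev.items := by
      rw [ihj]
      exact List.mem_map.mpr ⟨color[j], hci, rfl⟩
    have hgci : prev.getD color[j] 0 = tacG a b (treasure.drop (j + 1)) (color.drop (j + 1)) color[j] :=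
      PySem.Dict.getD_of_mem_items prev hmemit (hkeys ▸ hnd) 0
    have hpk : (prev.items.map Prod.fst).Nodup := by
      have h1 : prev.keys.Nodup := hkeys ▸ hnd
      exact h1
    have hfst : ((prev.items.map (fun p =>
        (p.1, max ((if p.1 == (PySem.List.pyGet? color (j:Int)).getD "" then a else b)
          * (PySem.List.pyGet? treasure (j:Int)).getD 0 + prev.getD ((PySem.List.pyGet? color (j:Int)).getD "") 0) p.2))).map Prod.fst).Nodup := by
      rw [List.map_map]
      have heq : prev.items.map (Prod.fst ∘ (fun p : String × Int =>
        (p.1, max ((if p.1 == (PySem.List.pyGet? color (j:Int)).getD "" then a else b)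
          * (PySem.List.pyGet? treasure (j:Int)).getD 0 + prev.getD ((PySem.List.pyGet? color (j:Int)).getD "") 0) p.2)))
          = prev.items.map Prod.fst := List.map_congr_left (fun p _ => rfl)
      rw [heq]
      exact hpk
    have hfresh := PySem.Dict.items_foldl_insert_fresh
      (prev.items.map (fun p =>
        (p.1, max ((if p.1 == (PySem.List.pyGet? color (j:Int)).getD "" then a else b)
          * (PySem.List.pyGet? treasure (j:Int)).getD 0 + prev.getD ((PySem.List.pyGet? color (j:Int)).getD "") 0) p.2)))
      Prod.fst Prod.snd PySem.Dict.empty (by intro p _; exact PySem.Dict.contains_empty _) hfst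
    show (PySem.Dict.ofList _).items = _
    rw [show (PySem.Dict.ofList : List (String × Int) → PySem.Dict String Int)
        = fun l => l.foldl (fun d p => d.insert p.1 p.2) PySem.Dict.empty from rfl]
    rw [hfresh]
    rw [ihj, List.map_map]
    rw [List.drop_eq_getElem_cons hjt, List.drop_eq_getElem_cons hjc]
    have hget_c : (PySem.List.pyGet? color (j:Int)).getD "" = color[j] := pyGetD_nat color j "" hjc
    have hget_t : (PySem.List.pyGet? treasure (j:Int)).getD 0 = treasure[j] := pyGetD_nat treasure j 0 hjt
    simp only [hget_c, hget_t, hgci]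
    simp only [show (PySem.Dict.empty : PySem.Dict String ℤ).items = ([] : List (String × ℤ)) from rfl,
      List.nil_append, List.map_map]
    apply List.map_congr_left
    intro c _
    simp [tacG]

-- ===== VERDICT (by name: the statement is the Claim_ definition above) =====
theorem tac_spec : Claim_equal_tac := by
  intro treasure color a b profit n prevC _hdom hpre
  obtain ⟨hn0, hnle, hor⟩ := hpre
  obtain ⟨n₀, rfl⟩ : ∃ m : Nat, n = (m : Int) := ⟨n.toNat, (Int.toNat_of_nonneg hn0).symm⟩
  have hn₀L : n₀ ≤ treasure.length := by exact_mod_cast hnle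
  show tac treasure color a b profit (n₀ : Int) prevC
      = tac_alt treasure color a b profit (n₀ : Int) prevC
  have hfuel : (((treasure.length : Int)) - (n₀ : Int)).toNat = treasure.length - n₀ := by omega
  set S : List String :=
    PySem.Set.union (PySem.Set.ofList
      (PySem.List.slice color (some (n₀ : Int)) (some ((treasure.length : Int))))) [prevC] with hSdef
  have hnd : S.Nodup := PySem.Set.nodup_add _ prevC (PySem.Set.nodup_ofList _)
  have hprevmem : prevC ∈ S := (PySem.Set.mem_add _ prevC prevC).mpr (Or.inr rfl)
  have hd : (S.foldl (fun d c => d.insert c 0) (PySem.Dict.empty : PySem.Dict String ℤ)).items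
      = S.map (fun c => (c, (0 : ℤ))) := by
    have := PySem.Dict.items_foldl_insert_fresh S (fun c => c) (fun _ => (0 : ℤ))
      PySem.Dict.empty (fun x _ => PySem.Dict.contains_empty x)
      (by simpa using hnd)
    simpa using this
  rcases hor with hlen' | hEq
  · have hlen : treasure.length ≤ color.length := by exact_mod_cast hlen'
    have hmem : ∀ j : Nat, n₀ ≤ j → (hj : j < treasure.length) →
        color[j]'(by omega) ∈ S := by
      intro j hjn hjt
      have hjc : j < color.length := by omega
      have hidx : j - n₀ < ((color.drop n₀).take (treasure.length - n₀)).length := by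
        simp only [List.length_take, List.length_drop]; omega
      have hel : ((color.drop n₀).take (treasure.length - n₀))[j - n₀]'hidx
          = color[j]'hjc := by
        rw [List.getElem_take, List.getElem_drop]
        congr 1
        omega
      have hmemtake : color[j]'hjc ∈ (color.drop n₀).take (treasure.length - n₀) :=
        hel ▸ List.getElem_mem hidx
      have hslice : PySem.List.slice color (some (n₀ : Int)) (some ((treasure.length : Int)))
          = (color.drop n₀).take (treasure.length - n₀) := PySem.List.slice_natCast color n₀ treasure.length
      refine (PySem.Set.mem_add _ prevC _).mpr (Or.inl ?_)
      refine (PySem.Set.mem_ofList _ _).mpr ?_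
      rw [hslice]
      exact hmemtake
    have hloop := tacAlt_loop treasure color a b hlen S hnd n₀ hmem _ hd
      (treasure.length - n₀) n₀ le_rfl (by omega)
    have hA := tacGo_eq treasure color a b hlen (treasure.length - n₀) n₀ (by omega) profit prevC
    have hgetD : ((PySem.List.pyRange (n₀ : Int) ((treasure.length : Int)) 1).reverse.foldl
          (tacAltStep treasure color a b)
          (S.foldl (fun d c => d.insert c 0) PySem.Dict.empty)).getD prevC 0
        = tacG a b (treasure.drop n₀) (color.drop n₀) prevC := by
      refine PySem.Dict.getD_of_mem_items _ ?_ ?_ 0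
      · rw [hloop]
        exact List.mem_map.mpr ⟨prevC, hprevmem, rfl⟩
      · show (List.map Prod.fst _).Nodup
        rw [hloop, List.map_map,
          show List.map (Prod.fst ∘ fun c => (c, tacG a b (treasure.drop n₀) (color.drop n₀) c)) S = S from
            (List.map_congr_left (fun x _ => rfl)).trans (List.map_id _)]
        exact hnd
    show tacGo treasure color a b (((treasure.length : Int)) - (n₀ : Int)).toNat profit (n₀ : Int) prevC = _
    rw [hfuel, hA]
    show _ = profit + _
    rw [hgetD]
  · have hn₀ : n₀ = treasure.length := by exact_mod_cast hEq
    subst hn₀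
    have hnil : PySem.List.pyRange ((treasure.length : Int)) ((treasure.length : Int)) 1 = [] := by simp [pysem]
    show tacGo treasure color a b (((treasure.length : Int)) - (treasure.length : Int)).toNat profit (treasure.length : Int) prevC = _
    have h0 : (((treasure.length : Int)) - (treasure.length : Int)).toNat = 0 := by omega
    rw [h0]
    have hgetD : ((PySem.List.pyRange (treasure.length : Int) ((treasure.length : Int)) 1).reverse.foldl
          (tacAltStep treasure color a b)
          (S.foldl (fun d c => d.insert c 0) PySem.Dict.empty)).getD prevC 0 = 0 := by
      rw [hnil]
      simp only [List.reverse_nil, List.foldl_nil]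
      refine PySem.Dict.getD_of_mem_items _ ?_ ?_ 0
      · rw [hd]
        exact List.mem_map.mpr ⟨prevC, hprevmem, rfl⟩
      · show (List.map Prod.fst _).Nodup
        rw [hd, List.map_map,
          show List.map (Prod.fst ∘ fun c => (c, (0:ℤ))) S = S from
            (List.map_congr_left (fun x _ => rfl)).trans (List.map_id _)]
        exact hnd
    show (profit : ℤ) = _
    rw [show tac_alt treasure color a b profit ((treasure.length : Int)) prevC
        = profit + ((PySem.List.pyRange (treasure.length : Int) ((treasure.length : Int)) 1).reverse.foldl
          (tacAltStep treasure color a b)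
          (S.foldl (fun d c => d.insert c 0) PySem.Dict.empty)).getD prevC 0 from rfl, hgetD]
    omega
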